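-- pv_equiv track=rewrite | github.com/Dan-Krod/Algo-programing-pt.2 | src/longest_word_chain.py | get_longest_chain_length
-- ===== SOURCE A (Python) =====
-- from typing import List, Dict
--
-- def get_longest_chain_length(words: List[str], word_index: Dict[str, int], i: int, memo: Dict[int, int]) -> int:
--     """
--     Compute the length of the longest chain ending with the word at index `i`.
--
--     Args:
--         words (List[str]): The list of words.
--         word_index (Dict[str, int]): A dictionary mapping words to their indices in `words`.
--         i (int): The current index in `words`.
--         memo (Dict[int, int]): A memoization dictionary to store the results of subproblems.
--
--     Returns:
--         int: The length of the longest word chain ending at the word `words[i]`.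
--     """
--     if i in memo:
--         return memo[i]
--
--     max_length = 1
--     current_word = words[i]
--     for j in range(len(current_word)):
--         pred = current_word[:j] + current_word[j+1:]
--         if pred in word_index:
--             chain_length = 1 + get_longest_chain_length(words, word_index, word_index[pred], memo)
--             max_length = max(max_length, chain_length)
--     memo[i] = max_length
--     return max_length
-- ===== SOURCE B (Python) =====
-- # Bottom-up re-implementation: instead of top-down memoized recursion, sort the
-- # indices by word length and fill a dp table in one forward pass (every
-- # one-char-deletion predecessor is strictly shorter, so it is already filled).
-- # Equivalence is about the RETURN value: A caches intermediate results in `memo`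
-- # for every node it visits, B only writes memo[i].
-- def get_longest_chain_length(words, word_index, i, memo):
--     if i in memo:
--         return memo[i]
--     order = sorted(range(len(words)), key=lambda j: len(words[j]))
--     dp = {}
--     for j in order:
--         if j in memo:
--             dp[j] = memo[j]
--         else:
--             w = words[j]
--             best = 1
--             for k in range(len(w)):
--                 pred = w[:k] + w[k + 1:]
--                 idx = word_index.get(pred)
--                 if idx is not None and idx in dp:
--                     best = max(best, 1 + dp[idx])
--             dp[j] = best
--     memo[i] = dp[i]
--     return dp[i]
-- ===== Notes on version B (the rewrite author's own statement) =====
-- stated objective: alternative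
-- what changed: Top-down memoized recursion is replaced by bottom-up dynamic programming: B sorts the indices by word length and fills a dp table in one forward pass (every one-char-deletion predecessor is strictly shorter, hence already computed), so there is no recursion at all; return-value equivalence only (A writes memo entries for every visited node, B writes only memo[i]).
-- outside the precondition, e.g. on get_longest_chain_length(['ab'], {}, -1, {}): A returns 1, B raises KeyError; on get_longest_chain_length(['ab', 'zz'], {'a': 1}, 0, {}): A returns 2, B returns 1
import Mathlib
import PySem

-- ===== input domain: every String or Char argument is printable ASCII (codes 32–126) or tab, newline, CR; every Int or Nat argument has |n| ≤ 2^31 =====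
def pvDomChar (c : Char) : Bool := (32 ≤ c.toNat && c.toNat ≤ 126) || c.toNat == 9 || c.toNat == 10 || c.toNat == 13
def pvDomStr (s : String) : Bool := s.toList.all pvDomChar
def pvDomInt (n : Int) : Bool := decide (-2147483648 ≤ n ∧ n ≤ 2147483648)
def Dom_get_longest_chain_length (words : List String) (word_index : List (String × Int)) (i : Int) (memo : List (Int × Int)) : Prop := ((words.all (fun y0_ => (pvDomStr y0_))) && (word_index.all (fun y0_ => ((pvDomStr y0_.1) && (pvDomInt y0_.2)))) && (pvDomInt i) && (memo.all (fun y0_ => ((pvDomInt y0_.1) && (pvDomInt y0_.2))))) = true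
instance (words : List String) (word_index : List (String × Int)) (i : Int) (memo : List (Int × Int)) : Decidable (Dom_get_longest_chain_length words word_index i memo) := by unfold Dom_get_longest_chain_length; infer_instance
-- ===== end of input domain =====

-- B replaces A's top-down memoized recursion by bottom-up DP over indices sorted by word
-- length (objective: alternative). Equivalence is about the RETURN value only: A caches a
-- memo entry for every node it visits, B writes only memo[i].

-- ===== PORT A =====
-- dict lookup = first match in the association list (Python dicts have unique keys)
def pvLook {α β : Type} [BEq α] (l : List (α × β)) (k : α) : Option β :=
  (l.find? (fun p => p.1 == k)).map Prod.snd

-- current_word[:j] + current_word[j+1:]  (exact for 0 ≤ j < len, the only use)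
def pvDel (cs : List Char) (j : Nat) : String := String.ofList (cs.take j ++ cs.drop (j+1))

-- the `for j in range(len(current_word))` loop of A; `rec` is the recursive call
def pvALoop (rec : Int → List (Int × Int) → Int × List (Int × Int))
    (word_index : List (String × Int)) (cs : List Char) :
    List Nat → Int → List (Int × Int) → Int × List (Int × Int)
  | [], m, memo => (m, memo)
  | j :: js, m, memo =>
    match pvLook word_index (pvDel cs j) with
    | none => pvALoop rec word_index cs js m memo
    | some idx =>
      let r := rec idx memo
      pvALoop rec word_index cs js (max m (1 + r.1)) r.2

-- A's recursion, with a fuel argument for termination only: under Pre_ the recursion depth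
-- is bounded by len(words[i]) + 1 ≤ pvMaxLen + 1, so the fuel is never exhausted.
def pvA (words : List String) (word_index : List (String × Int)) :
    Nat → Int → List (Int × Int) → Int × List (Int × Int)
  | 0, _, memo => (0, memo)
  | f + 1, i, memo =>
    match pvLook memo i with
    | some v => (v, memo)
    | none =>
      let cs := ((PySem.List.pyGet? words i).getD "").toList
      let r := pvALoop (pvA words word_index f) word_index cs (List.range cs.length) 1 memo
      -- memo[i] = max_length: i was checked absent, and (under Pre_) recursion only reaches
      -- strictly shorter words, so the key is fresh and the dict write appends
      (r.1, r.2 ++ [(i, r.1)])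

def pvMaxLen (words : List String) : Nat := (words.map (fun w => w.toList.length)).foldr max 0

def get_longest_chain_length (words : List String) (word_index : List (String × Int)) (i : Int) (memo : List (Int × Int)) : Int :=
  (pvA words word_index (pvMaxLen words + 2) i memo).1

-- ===== PORT B =====
-- B's inner loop: best chain length over the one-char-deletion predecessors already in dp
def pvBBest (word_index : List (String × Int)) (dp : List (Int × Int)) (cs : List Char) : Int :=
  (List.range cs.length).foldl (fun best k =>
    match pvLook word_index (pvDel cs k) with
    | some idx =>
      match pvLook dp idx with
      | some dv => max best (1 + dv)
      | none => best
    | none => best) 1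

def get_longest_chain_length_alt (words : List String) (word_index : List (String × Int)) (i : Int) (memo : List (Int × Int)) : Int :=
  match pvLook memo i with
  | some v => v
  | none =>
    let order := PySem.List.sorted (List.range words.length)
        (fun j => (words.getD j "").toList.length) false
    let dp := order.foldl (fun dp (j : Nat) =>
      dp ++ [((j : Int),
        match pvLook memo ((j : Nat) : Int) with
        | some v => v
        | none => pvBBest word_index dp (words.getD j "").toList)]) []
    (pvLook dp i).getD 0   -- dp[i]; under Pre_, i is a key of dp

-- ===== PRECONDITION & SPEC =====
-- a string that can ever be looked up in word_index: a one-char deletion of some word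
def pvRel (words : List String) (s : String) : Bool :=
  words.any (fun u => (List.range u.toList.length).any (fun k => s == pvDel u.toList k))

-- Pre_ admits any input whose index i is memoized, and otherwise requires 0 ≤ i < len(words)
-- and that word_index respects the documented contract (words mapped to their indices) on
-- every entry the algorithm could ever look up (keys that are one-char deletions of a word).
-- It excludes inputs on which A raises (IndexError on an out-of-range index, RecursionError
-- on a cyclic word_index) and inputs with a negative or otherwise contract-violating index,
-- on which A's value relies on Python's negative-index wraparound or on dict entries that
-- contradict the documented contract; on some of those A still returns a value that B does
-- not reproduce (see cites).
def Pre_get_longest_chain_length (words : List String) (word_index : List (String × Int)) (i : Int) (memo : List (Int × Int)) : Prop :=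
  (pvLook memo i).isSome = true ∨
  (0 ≤ i ∧ i < (words.length : Int) ∧
    ∀ p ∈ word_index, pvRel words p.1 = true →
      0 ≤ p.2 ∧ PySem.List.pyGet? words p.2 = some p.1)
instance (words : List String) (word_index : List (String × Int)) (i : Int) (memo : List (Int × Int)) : Decidable (Pre_get_longest_chain_length words word_index i memo) := by unfold Pre_get_longest_chain_length; infer_instance

def pvWitness_get_longest_chain_length : List String × (List (String × Int)) × Int × (List (Int × Int)) :=
  (["a", "ab"], [("a", 0), ("ab", 1)], 1, [])

def Spec_get_longest_chain_length (words : List String) (word_index : List (String × Int)) (i : Int) (memo : List (Int × Int)) (out : Int) : Prop := out = get_longest_chain_length_alt words word_index i memo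
instance (words : List String) (word_index : List (String × Int)) (i : Int) (memo : List (Int × Int)) (out : Int) : Decidable (Spec_get_longest_chain_length words word_index i memo out) := by unfold Spec_get_longest_chain_length; infer_instance

-- ===== CLAIM (what is proved, stated in full; the proofs are below) =====
def Claim_equal_get_longest_chain_length : Prop := ∀ (words : List String) (word_index : List (String × Int)) (i : Int) (memo : List (Int × Int)), Dom_get_longest_chain_length words word_index i memo → Pre_get_longest_chain_length words word_index i memo → Spec_get_longest_chain_length words word_index i memo (get_longest_chain_length words word_index i memo)

-- ===== LEMMAS AND PROOFS =====

-- the pure chain-length value: fuel-indexed, memo0 entries take precedence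
def chainV (words : List String) (word_index : List (String × Int)) (memo0 : List (Int × Int)) :
    Nat → Int → Int
  | 0, _ => 0
  | f + 1, i =>
    match pvLook memo0 i with
    | some v => v
    | none =>
      let cs := ((PySem.List.pyGet? words i).getD "").toList
      (List.range cs.length).foldl (fun m j =>
        match pvLook word_index (pvDel cs j) with
        | some idx => max m (1 + chainV words word_index memo0 f idx)
        | none => m) 1

def lenOf (words : List String) (i : Int) : Nat :=
  ((PySem.List.pyGet? words i).getD "").toList.length

def pvV (words : List String) (word_index : List (String × Int)) (memo0 : List (Int × Int)) (i : Int) : Int :=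
  chainV words word_index memo0 (lenOf words i + 1) i

def pvVLoop (words : List String) (word_index : List (String × Int)) (memo0 : List (Int × Int))
    (cs : List Char) (js : List Nat) (m : Int) : Int :=
  js.foldl (fun m j =>
    match pvLook word_index (pvDel cs j) with
    | some idx => max m (1 + pvV words word_index memo0 idx)
    | none => m) m

def pvG (words : List String) (word_index : List (String × Int)) (memo0 : List (Int × Int)) (j : Nat) : Int × Int :=
  ((j : Int), pvV words word_index memo0 (j : Int))

def pvCons (words : List String) (word_index : List (String × Int)) : Prop :=
  ∀ p ∈ word_index, pvRel words p.1 = true →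
    0 ≤ p.2 ∧ PySem.List.pyGet? words p.2 = some p.1

theorem pvRel_of_get {words : List String} {i : Int} {j : Nat}
    (hj : j < ((PySem.List.pyGet? words i).getD "").toList.length) :
    pvRel words (pvDel ((PySem.List.pyGet? words i).getD "").toList j) = true := by
  cases h : PySem.List.pyGet? words i with
  | none => rw [h] at hj; simp at hj
  | some w =>
    rw [h] at hj
    simp only [Option.getD_some] at hj ⊢
    unfold pvRel
    rw [List.any_eq_true]
    refine ⟨w, PySem.List.mem_of_pyGet?_eq_some words h, ?_⟩
    rw [List.any_eq_true]
    exact ⟨j, List.mem_range.mpr hj, by simp⟩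

def pvGoodM (words : List String) (word_index : List (String × Int)) (memo0 memo : List (Int × Int)) : Prop :=
  (∀ k, (pvLook memo0 k).isSome = true → pvLook memo k = pvLook memo0 k) ∧
  (∀ k v, pvLook memo k = some v → pvLook memo0 k = some v ∨ v = pvV words word_index memo0 k)

theorem pvLook_append {α β : Type} [BEq α] (l1 l2 : List (α × β)) (k : α) :
    pvLook (l1 ++ l2) k = ((pvLook l1 k).or (pvLook l2 k)) := by
  simp [pvLook, List.find?_append, Option.map_or]

theorem pvLook_wi {words : List String} {word_index : List (String × Int)}
    (hC : pvCons words word_index) {s : String} {idx : Int} (hR : pvRel words s = true)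
    (h : pvLook word_index s = some idx) :
    0 ≤ idx ∧ PySem.List.pyGet? words idx = some s := by
  unfold pvLook at h
  obtain ⟨p, hfind, hmap⟩ := Option.map_eq_some_iff.mp h
  have hmem := List.mem_of_find?_eq_some hfind
  have hpred : (p.1 == s) = true := List.find?_eq_some_iff_getElem.mp hfind |>.1
  have := hC p hmem (by rwa [eq_of_beq hpred])
  subst hmap
  rcases this with ⟨h1, h2⟩
  exact ⟨h1, by rwa [eq_of_beq hpred] at h2⟩

theorem pvDel_len {cs : List Char} {j : Nat} (h : j < cs.length) :
    (pvDel cs j).toList.length = cs.length - 1 := by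
  simp [pvDel]
  omega

theorem pvFoldl_congr {α β : Type} (l : List β) (f g : α → β → α) (init : α)
    (h : ∀ a, ∀ b ∈ l, f a b = g a b) : l.foldl f init = l.foldl g init := by
  induction l generalizing init with
  | nil => rfl
  | cons b bs ih =>
    simp only [List.foldl_cons]
    rw [h init b (by simp)]
    exact ih _ (fun a b hb => h a b (by simp [hb]))

theorem chainV_eq_VLoop {words : List String} {word_index : List (String × Int)}
    {memo0 : List (Int × Int)} (hC : pvCons words word_index) {i : Int}
    (h0 : pvLook memo0 i = none) :
    pvV words word_index memo0 i =
      pvVLoop words word_index memo0 (((PySem.List.pyGet? words i).getD "").toList)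
        (List.range (((PySem.List.pyGet? words i).getD "").toList.length)) 1 := by
  unfold pvV pvVLoop
  rw [chainV]
  simp only [h0]
  apply pvFoldl_congr
  intro m j hj
  rw [List.mem_range] at hj
  cases hw : pvLook word_index (pvDel (((PySem.List.pyGet? words i).getD "").toList) j) with
  | none => rfl
  | some idx =>
    obtain ⟨hge, hget⟩ := pvLook_wi hC (pvRel_of_get hj) hw
    have hlidx : lenOf words idx = (((PySem.List.pyGet? words i).getD "").toList).length - 1 := by
      unfold lenOf
      rw [hget, Option.getD_some]
      exact pvDel_len hj
    have hfuel : lenOf words idx + 1 = lenOf words i := by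
      unfold lenOf at *
      omega
    rw [← hfuel]
    rfl

theorem pvALoop_spec {words : List String} {word_index : List (String × Int)}
    {memo0 : List (Int × Int)} (hC : pvCons words word_index) (f : Nat) (cs : List Char)
    (hf : cs.length ≤ f) (hrel : ∀ j, j < cs.length → pvRel words (pvDel cs j) = true)
    (hrec : ∀ (i : Int) (memo : List (Int × Int)),
      pvGoodM words word_index memo0 memo → lenOf words i < f →
      (pvA words word_index f i memo).1 = pvV words word_index memo0 i ∧
      pvGoodM words word_index memo0 (pvA words word_index f i memo).2) :
    ∀ (js : List Nat), (∀ j ∈ js, j < cs.length) →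
      ∀ (m : Int) (memo : List (Int × Int)), pvGoodM words word_index memo0 memo →
      (pvALoop (pvA words word_index f) word_index cs js m memo).1 =
        pvVLoop words word_index memo0 cs js m ∧
      pvGoodM words word_index memo0
        (pvALoop (pvA words word_index f) word_index cs js m memo).2 := by
  intro js
  induction js with
  | nil => intro _ m memo hG; exact ⟨rfl, hG⟩
  | cons j js ih =>
    intro hjs m memo hG
    have hj : j < cs.length := hjs j (by simp)
    cases hw : pvLook word_index (pvDel cs j) with
    | none =>
      simp only [pvALoop, hw, pvVLoop, List.foldl_cons]
      exact ih (fun a ha => hjs a (by simp [ha])) m memo hG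
    | some idx =>
      obtain ⟨hge, hget⟩ := pvLook_wi hC (hrel j hj) hw
      have hlidx : lenOf words idx < f := by
        have := pvDel_len hj
        unfold lenOf
        rw [hget, Option.getD_some]
        omega
      obtain ⟨hv, hg⟩ := hrec idx memo hG hlidx
      simp only [pvALoop, hw, pvVLoop, List.foldl_cons]
      rw [hv]
      exact ih (fun a ha => hjs a (by simp [ha])) _ _ hg

theorem pvA_spec {words : List String} {word_index : List (String × Int)}
    {memo0 : List (Int × Int)} (hC : pvCons words word_index) :
    ∀ (f : Nat) (i : Int) (memo : List (Int × Int)),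
      pvGoodM words word_index memo0 memo → lenOf words i < f →
      (pvA words word_index f i memo).1 = pvV words word_index memo0 i ∧
      pvGoodM words word_index memo0 (pvA words word_index f i memo).2 := by
  intro f
  induction f with
  | zero => intro i memo _ hlen; omega
  | succ f ih =>
    intro i memo hG hlen
    cases hm : pvLook memo i with
    | some v =>
      simp only [pvA, hm]
      refine ⟨?_, hG⟩
      rcases hG.2 i v hm with h1 | h2
      · unfold pvV; rw [chainV]; simp [h1]
      · exact h2
    | none =>
      have h0 : pvLook memo0 i = none := by
        cases hm0 : pvLook memo0 i with
        | none => rfl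
        | some w =>
          have := hG.1 i (by simp [hm0])
          rw [hm0] at this
          rw [hm] at this
          exact absurd this (by simp)
      have hfle : (((PySem.List.pyGet? words i).getD "").toList).length ≤ f := by
        unfold lenOf at hlen; omega
      obtain ⟨hv, hg⟩ := pvALoop_spec hC f (((PySem.List.pyGet? words i).getD "").toList) hfle
        (fun j hj => pvRel_of_get hj)
        (fun i' memo' hG' hlen' => ih i' memo' hG' hlen')
        (List.range (((PySem.List.pyGet? words i).getD "").toList).length)
        (fun j hj => List.mem_range.mp hj) 1 memo hG
      simp only [pvA, hm]
      rw [hv]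
      refine ⟨(chainV_eq_VLoop hC h0).symm, ?_, ?_⟩
      · intro k hk
        rw [pvLook_append, hg.1 k hk]
        cases hkk : pvLook memo0 k with
        | none => exact absurd hk (by simp [hkk])
        | some w => simp
      · intro k v hkv
        rw [pvLook_append] at hkv
        cases hr2 : pvLook (pvALoop (pvA words word_index f) word_index
            (((PySem.List.pyGet? words i).getD "").toList)
            (List.range (((PySem.List.pyGet? words i).getD "").toList).length) 1 memo).2 k with
        | some w =>
          rw [hr2] at hkv
          simp only [Option.some_or, Option.some.injEq] at hkv
          exact hg.2 k v (by rw [hr2, hkv])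
        | none =>
          rw [hr2] at hkv
          simp only [Option.none_or] at hkv
          unfold pvLook at hkv
          simp only [List.find?_singleton, beq_iff_eq] at hkv
          by_cases hik : i = k
          · simp only [hik, if_true, Option.map_some, Option.some.injEq] at hkv
            right
            rw [← hkv]
            exact (chainV_eq_VLoop hC (hik ▸ h0)).symm
          · simp [hik] at hkv

theorem pvLook_map_nodup {words : List String} {word_index : List (String × Int)}
    {memo0 : List (Int × Int)} :
    ∀ (done : List Nat), done.Nodup → ∀ {j : Nat}, j ∈ done →
      pvLook (done.map (pvG words word_index memo0)) (j : Int) =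
        some (pvV words word_index memo0 (j : Int)) := by
  intro done
  induction done with
  | nil => intro _ j hj; simp at hj
  | cons d ds ih =>
    intro hnd j hj
    unfold pvLook
    simp only [List.map_cons]
    by_cases hdj : d = j
    · subst hdj
      rw [List.find?_cons_of_pos (by simp [pvG])]
      simp [pvG]
    · rw [List.find?_cons_of_neg (by simp [pvG, hdj])]
      have hj' : j ∈ ds := by
        rcases List.mem_cons.mp hj with h1 | h1
        · exact absurd h1.symm hdj
        · exact h1
      exact ih (List.Nodup.of_cons hnd) hj'

theorem pvB_fold {words : List String} {word_index : List (String × Int)}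
    {memo0 : List (Int × Int)} (hC : pvCons words word_index) :
    ∀ (rest done : List Nat),
      done ++ rest = PySem.List.sorted (List.range words.length)
          (fun j => (words.getD j "").toList.length) false →
      rest.foldl (fun dp (j : Nat) =>
        dp ++ [((j : Int),
          match pvLook memo0 ((j : Nat) : Int) with
          | some v => v
          | none => pvBBest word_index dp (words.getD j "").toList)])
        (done.map (pvG words word_index memo0)) =
      (PySem.List.sorted (List.range words.length)
          (fun j => (words.getD j "").toList.length) false).map
        (pvG words word_index memo0) := by
  intro rest
  induction rest with
  | nil =>
    intro done h
    rw [List.append_nil] at h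
    rw [h]
    simp only [List.foldl_nil]
  | cons j rest ih =>
    intro done h
    have hperm : (PySem.List.sorted (List.range words.length)
        (fun j => (words.getD j "").toList.length) false).Perm (List.range words.length) :=
      PySem.List.sorted_perm _ _ _
    have hnodup : (PySem.List.sorted (List.range words.length)
        (fun j => (words.getD j "").toList.length) false).Nodup :=
      hperm.nodup_iff.mpr (List.nodup_range)
    have hdone_nodup : done.Nodup := by
      rw [← h] at hnodup
      exact ((List.sublist_append_left done (j :: rest)).nodup hnodup)
    have hcsj : words.getD j "" = ((PySem.List.pyGet? words ((j : Nat) : Int)).getD "") := by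
      rw [PySem.List.pyGet?_natCast, List.getD_eq_getElem?_getD]
    have hval : (match pvLook memo0 ((j : Nat) : Int) with
        | some v => v
        | none => pvBBest word_index (done.map (pvG words word_index memo0))
            (words.getD j "").toList)
        = pvV words word_index memo0 ((j : Nat) : Int) := by
      cases hmj : pvLook memo0 ((j : Nat) : Int) with
      | some v =>
        simp only
        unfold pvV
        rw [chainV]
        simp [hmj]
      | none =>
        simp only
        rw [chainV_eq_VLoop hC hmj]
        unfold pvBBest pvVLoop
        rw [← hcsj]
        apply pvFoldl_congr
        intro best k hk
        rw [List.mem_range] at hk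
        cases hw : pvLook word_index (pvDel (words.getD j "").toList k) with
        | none => rfl
        | some idx =>
          have hk' : k < ((PySem.List.pyGet? words ((j : Nat) : Int)).getD "").toList.length := by
            rw [← hcsj]; exact hk
          obtain ⟨hge, hget⟩ := pvLook_wi hC (by rw [hcsj]; exact pvRel_of_get hk') hw
          have hdel := pvDel_len hk
          have hkey_idx : (words.getD idx.toNat "").toList.length =
              (words.getD j "").toList.length - 1 := by
            rw [List.getD_eq_getElem?_getD]
            rw [PySem.List.pyGet?_of_nonneg words hge] at hget
            rw [hget]
            simpa using hdel
          have hidxn : idx.toNat < words.length := by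
            rw [PySem.List.pyGet?_of_nonneg words hge] at hget
            exact (List.getElem?_eq_some_iff.mp hget).1
          have hmemdone : idx.toNat ∈ done := by
            have h1 : idx.toNat ∈ (PySem.List.sorted (List.range words.length)
                (fun j => (words.getD j "").toList.length) false) :=
              hperm.mem_iff.mpr (List.mem_range.mpr hidxn)
            rw [← h] at h1
            rcases List.mem_append.mp h1 with hd | hjr
            · exact hd
            · exfalso
              have hp := PySem.List.sorted_pairwise (List.range words.length)
                (fun j => (words.getD j "").toList.length)
              rw [← h] at hp
              rcases List.mem_cons.mp hjr with h2 | h2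
              · rw [h2] at hkey_idx
                omega
              · have hle := (List.pairwise_cons.mp (List.pairwise_append.mp hp).2.1).1
                  idx.toNat h2
                simp only at hle
                omega
          rw [← Int.toNat_of_nonneg hge]
          simp only [pvLook_map_nodup done hdone_nodup hmemdone]
    simp only [List.foldl_cons]
    rw [hval]
    have h2 : (done ++ [j]) ++ rest = PySem.List.sorted (List.range words.length)
        (fun j => (words.getD j "").toList.length) false := by
      simpa [List.append_assoc] using h
    have := ih (done ++ [j]) h2
    rw [List.map_append] at this
    simpa using this

theorem pvB_spec {words : List String} {word_index : List (String × Int)}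
    {memo0 : List (Int × Int)} (hC : pvCons words word_index) {i : Int}
    (hi : 0 ≤ i ∧ i < (words.length : Int)) :
    get_longest_chain_length_alt words word_index i memo0 = pvV words word_index memo0 i := by
  unfold get_longest_chain_length_alt
  cases hm : pvLook memo0 i with
  | some v =>
    unfold pvV
    rw [chainV]
    simp [hm]
  | none =>
    simp only []
    have hfold := @pvB_fold words word_index memo0 hC (PySem.List.sorted (List.range words.length)
        (fun j => (words.getD j "").toList.length) false) [] (by simp)
    simp only [List.map_nil] at hfold
    rw [hfold]
    have hperm : (PySem.List.sorted (List.range words.length)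
        (fun j => (words.getD j "").toList.length) false).Perm (List.range words.length) :=
      PySem.List.sorted_perm _ _ _
    have hnodup : (PySem.List.sorted (List.range words.length)
        (fun j => (words.getD j "").toList.length) false).Nodup :=
      hperm.nodup_iff.mpr (List.nodup_range)
    have hmem : i.toNat ∈ (PySem.List.sorted (List.range words.length)
        (fun j => (words.getD j "").toList.length) false) := by
      apply hperm.mem_iff.mpr
      rw [List.mem_range]
      omega
    -- convert the over-the-order map into a list with nodup "keys": index by i.toNat
    rw [show i = ((i.toNat : Nat) : Int) from (Int.toNat_of_nonneg hi.1).symm]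
    rw [pvLook_map_nodup _ hnodup hmem]
    rfl

theorem pvLenOf_le {words : List String} {i : Int} : lenOf words i ≤ pvMaxLen words := by
  unfold lenOf pvMaxLen
  cases h : PySem.List.pyGet? words i with
  | none => simp
  | some w =>
    have hw : w ∈ words := PySem.List.mem_of_pyGet?_eq_some words h
    have hm : w.toList.length ∈ words.map (fun w => w.toList.length) := List.mem_map_of_mem hw
    simp only [Option.getD_some]
    generalize words.map (fun w => w.toList.length) = l at hm
    induction l with
    | nil => simp at hm
    | cons a as ih =>
      rcases List.mem_cons.mp hm with h1 | h2
      · subst h1; simp [List.foldr]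
      · simp only [List.foldr_cons]
        exact le_trans (ih h2) (le_max_right _ _)

-- ===== VERDICT (by name: the statement is the Claim_ definition above) =====
theorem get_longest_chain_length_spec : Claim_equal_get_longest_chain_length := by
  intro words word_index i memo _hDom hPre
  unfold Spec_get_longest_chain_length
  rcases hPre with hs | ⟨h0, hn, hC⟩
  · obtain ⟨v, hv⟩ := Option.isSome_iff_exists.mp hs
    unfold get_longest_chain_length get_longest_chain_length_alt
    rw [show pvMaxLen words + 2 = (pvMaxLen words + 1) + 1 from rfl]
    simp only [pvA]
    simp [hv]
  · have hG : pvGoodM words word_index memo memo :=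
      ⟨fun k _ => rfl, fun k v h => Or.inl h⟩
    have hlen : lenOf words i < pvMaxLen words + 2 := by
      have := @pvLenOf_le words i
      omega
    have hA := (pvA_spec (memo0 := memo) hC (pvMaxLen words + 2) i memo hG hlen).1
    unfold get_longest_chain_length
    rw [hA, pvB_spec hC ⟨h0, hn⟩]
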